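-- pv_equiv track=rewrite | github.com/maikaicher/book1 | Kap15/Python/Listing21_22/BitmapGenerator.py | setBytesLittleEnd
-- ===== SOURCE A (Python) =====
-- def setBytesLittleEnd (offset, value, allBytes):
--     writeValue = 0
--     while value > 0:
--         writeValue = value & 0xff
--         allBytes[offset] = writeValue
--         offset = offset + 1
--         value >>= 8
--         if offset >= len(allBytes):
--             return False
--     return True
-- ===== SOURCE B (Python) =====
-- def setBytesLittleEnd(offset, value, allBytes):
--     # pass 1: extract all little-endian bytes of value
--     digits = []
--     v = value
--     while v > 0:
--         digits.append(v & 0xff)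
--         v >>= 8
--     # pass 2: write them into the buffer
--     for b in digits:
--         allBytes[offset] = b
--         offset += 1
--         if offset >= len(allBytes):
--             return False
--     return True
-- ===== Notes on version B (the rewrite author's own statement) =====
-- stated objective: alternative
-- what changed: Replaces A's single fused write-while-decomposing loop with a build-then-consume decomposition: one pass extracts the little-endian byte list of value, a second pass writes it into the buffer.
import Mathlib
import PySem

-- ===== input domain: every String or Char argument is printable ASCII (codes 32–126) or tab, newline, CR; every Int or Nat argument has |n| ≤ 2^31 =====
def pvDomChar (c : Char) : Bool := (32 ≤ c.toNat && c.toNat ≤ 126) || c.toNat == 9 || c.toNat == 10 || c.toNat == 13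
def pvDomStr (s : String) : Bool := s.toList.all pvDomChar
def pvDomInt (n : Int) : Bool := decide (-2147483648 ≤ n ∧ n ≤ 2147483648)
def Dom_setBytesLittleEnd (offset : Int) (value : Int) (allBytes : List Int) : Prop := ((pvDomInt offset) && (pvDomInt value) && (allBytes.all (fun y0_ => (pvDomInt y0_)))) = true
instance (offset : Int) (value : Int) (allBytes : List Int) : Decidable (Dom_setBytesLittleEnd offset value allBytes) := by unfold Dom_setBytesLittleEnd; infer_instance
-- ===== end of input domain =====

-- B keeps A's observable mutation pattern (same writes, same order); the equivalence proved here is about the RETURN value only.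

-- termination helper for both ports: v >> 8 shrinks a positive v
theorem pvShr8_toNat_lt (v : Int) (h : 0 < v) : (v >>> (8 : Nat)).toNat < v.toNat := by
  have e : v >>> (8 : Nat) = v / 2 ^ 8 := by rw [Int.shiftRight_eq_div_pow]; norm_num
  rw [e]; omega

-- ===== PORT A =====
-- literal transliteration of A's fused while-loop: write a byte, advance, shift, check
def setBytesLittleEnd (offset : Int) (value : Int) (allBytes : List Int) : Bool :=
  if h : value > 0 then
    let writeValue := PySem.Int.band value 0xff
    match PySem.List.pySet? allBytes offset writeValue with
    | none => false  -- Python raises IndexError here; such inputs are excluded by Pre_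
    | some bs =>
      if offset + 1 ≥ (bs.length : Int) then false
      else setBytesLittleEnd (offset + 1) (value >>> (8:Nat)) bs
  else true
termination_by value.toNat
decreasing_by exact pvShr8_toNat_lt value h

-- ===== PORT B =====
-- pass 1 of Source B: extract the little-endian byte list of value
def pvBytesLE (v : Int) : List Int :=
  if h : v > 0 then PySem.Int.band v 0xff :: pvBytesLE (v >>> (8:Nat)) else []
termination_by v.toNat
decreasing_by exact pvShr8_toNat_lt v h

-- pass 2 of Source B: write the collected bytes into the buffer
def pvWriteBytes (digits : List Int) (offset : Int) (allBytes : List Int) : Bool :=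
  match digits with
  | [] => true
  | b :: rest =>
    match PySem.List.pySet? allBytes offset b with
    | none => false  -- Python raises IndexError here; such inputs are excluded by Pre_
    | some bs =>
      if offset + 1 ≥ (bs.length : Int) then false
      else pvWriteBytes rest (offset + 1) bs

def setBytesLittleEnd_alt (offset : Int) (value : Int) (allBytes : List Int) : Bool :=
  pvWriteBytes (pvBytesLE value) offset allBytes

-- ===== PRECONDITION & SPEC =====
-- Pre_ excludes exactly the inputs on which Python A raises IndexError: a positive value with an
-- initial offset outside [-len(allBytes), len(allBytes)).
def Pre_setBytesLittleEnd (offset : Int) (value : Int) (allBytes : List Int) : Prop :=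
  value ≤ 0 ∨ (-(allBytes.length : Int) ≤ offset ∧ offset < (allBytes.length : Int))
instance (offset : Int) (value : Int) (allBytes : List Int) : Decidable (Pre_setBytesLittleEnd offset value allBytes) := by unfold Pre_setBytesLittleEnd; infer_instance

def pvWitness_setBytesLittleEnd : Int × Int × List Int := (1, 258, [0, 0, 0, 0, 0])

def Spec_setBytesLittleEnd (offset : Int) (value : Int) (allBytes : List Int) (out : Bool) : Prop := out = setBytesLittleEnd_alt offset value allBytes
instance (offset : Int) (value : Int) (allBytes : List Int) (out : Bool) : Decidable (Spec_setBytesLittleEnd offset value allBytes out) := by unfold Spec_setBytesLittleEnd; infer_instance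

-- ===== CLAIM (what is proved, stated in full; the proofs are below) =====
def Claim_equal_setBytesLittleEnd : Prop := ∀ (offset : Int) (value : Int) (allBytes : List Int), Dom_setBytesLittleEnd offset value allBytes → Pre_setBytesLittleEnd offset value allBytes → Spec_setBytesLittleEnd offset value allBytes (setBytesLittleEnd offset value allBytes)

-- ===== LEMMAS AND PROOFS =====
-- The two ports agree on ALL inputs (Pre_ only serves to exclude Python's IndexError inputs).
theorem pvEquiv (n : Nat) : ∀ (value offset : Int) (allBytes : List Int),
    value.toNat = n → setBytesLittleEnd offset value allBytes = pvWriteBytes (pvBytesLE value) offset allBytes := by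
  induction n using Nat.strong_induction_on with
  | _ n ih =>
    intro value offset allBytes hn
    rw [setBytesLittleEnd.eq_def, pvBytesLE.eq_def]
    by_cases h : value > 0
    · simp only [dif_pos h, pvWriteBytes]
      cases PySem.List.pySet? allBytes offset (PySem.Int.band value 0xff) with
      | none => rfl
      | some bs =>
        simp only
        by_cases hle : offset + 1 ≥ (bs.length : Int)
        · simp [hle]
        · simp only [if_neg hle]
          exact ih (value >>> (8:Nat)).toNat (hn ▸ pvShr8_toNat_lt value h) _ _ _ rfl
    · simp [dif_neg h, pvWriteBytes]

-- ===== VERDICT (by name: the statement is the Claim_ definition above) =====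
theorem setBytesLittleEnd_spec : Claim_equal_setBytesLittleEnd := by
  intro offset value allBytes _ _
  unfold Spec_setBytesLittleEnd setBytesLittleEnd_alt
  exact pvEquiv value.toNat value offset allBytes rfl
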